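-- pv_equiv track=rewrite | github.com/lailac-ds-1207/crm-agents | agents/segmentation_agent/text2sql.py | _clean_sql_query
-- ===== SOURCE A (Python) =====
-- def _clean_sql_query(sql_query: str) -> str:
--     """
--     Clean up the SQL query by removing markdown formatting.
--
--     Args:
--         sql_query: Raw SQL query from LLM
--
--     Returns:
--         Cleaned SQL query
--     """
--     # Remove markdown code block formatting if present
--     if "```sql" in sql_query:
--         sql_query = sql_query.split("```sql")[1]
--     elif "```" in sql_query:
--         sql_query = sql_query.split("```")[1]
--
--     # Remove trailing markdown markers
--     if "```" in sql_query:
--         sql_query = sql_query.split("```")[0]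
--
--     # Remove any explanatory text before or after the query
--     lines = sql_query.strip().split('\n')
--     sql_lines = []
--     in_sql = False
--
--     for line in lines:
--         stripped = line.strip()
--
--         # Skip empty lines
--         if not stripped:
--             continue
--
--         # Check if this line looks like SQL
--         if (in_sql or
--             stripped.startswith("SELECT") or
--             stripped.startswith("WITH") or
--             stripped.startswith("CREATE") or
--             stripped.startswith("--")):
--             in_sql = True
--             sql_lines.append(line)
--
--     # If we didn't find any SQL lines, return the original (might be a one-liner)
--     if not sql_lines:
--         return sql_query.strip()
--
--     return '\n'.join(sql_lines).strip()
-- ===== SOURCE B (Python) =====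
-- def _strip_fences(sql_query):
--     if "```sql" in sql_query:
--         sql_query = sql_query.split("```sql")[1]
--     elif "```" in sql_query:
--         sql_query = sql_query.split("```")[1]
--     if "```" in sql_query:
--         sql_query = sql_query.split("```")[0]
--     return sql_query
--
--
-- def _clean_sql_query(sql_query: str) -> str:
--     # Filter blanks first, then a REVERSE counting scan: remember how many
--     # non-blank lines remain from each SQL-looking line to the end; the last
--     # value remembered (earliest SQL line) gives the answer as a negative slice.
--     body = _strip_fences(sql_query)
--     nonblank = [line for line in body.strip().split('\n') if line.strip()]
--     count = 0
--     best = None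
--     for line in reversed(nonblank):
--         count += 1
--         if line.strip().startswith(("SELECT", "WITH", "CREATE", "--")):
--             best = count
--     if best is None:
--         return body.strip()
--     return '\n'.join(nonblank[-best:]).strip()
-- ===== Notes on version B (the rewrite author's own statement) =====
-- stated objective: alternative
-- what changed: Replaces A's forward latching in_sql state machine over raw lines with a filter-blanks-first list, a reverse counting scan that remembers how many non-blank lines follow each SQL-looking line, and a negative slice nonblank[-best:] to produce the result.
import Mathlib
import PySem

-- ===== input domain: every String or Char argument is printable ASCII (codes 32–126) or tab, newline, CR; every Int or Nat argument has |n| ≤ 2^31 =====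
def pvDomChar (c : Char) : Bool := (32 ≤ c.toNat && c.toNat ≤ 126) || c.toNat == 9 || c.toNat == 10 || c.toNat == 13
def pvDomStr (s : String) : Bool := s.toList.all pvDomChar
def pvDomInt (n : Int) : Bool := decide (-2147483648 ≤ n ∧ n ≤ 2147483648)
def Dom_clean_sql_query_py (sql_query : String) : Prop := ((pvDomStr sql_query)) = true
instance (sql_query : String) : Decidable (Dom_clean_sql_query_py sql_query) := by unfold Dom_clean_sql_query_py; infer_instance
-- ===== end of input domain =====

-- B replaces A's forward latching in_sql state machine over raw lines with: filter out blank
-- lines first, then a reverse counting scan remembering how many non-blank lines follow each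
-- SQL-looking line, then a negative slice nonblank[-best:]; same result, similar cost.

-- ===== PORT A =====
def clean_sql_query_py (sql_query : String) : String :=
  let sql_query :=
    if PySem.Str.isIn "```sql" sql_query then ((PySem.Str.split? sql_query "```sql").getD [])[1]!
    else if PySem.Str.isIn "```" sql_query then ((PySem.Str.split? sql_query "```").getD [])[1]!
    else sql_query
  let sql_query :=
    if PySem.Str.isIn "```" sql_query then ((PySem.Str.split? sql_query "```").getD [])[0]!
    else sql_query
  let lines := (PySem.Str.split? (PySem.Str.strip sql_query) "\n").getD []
  let res := lines.foldl (fun (st : List String × Bool) line =>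
      let stripped := PySem.Str.strip line
      if stripped = "" then st
      else if st.2 || PySem.Str.startswith stripped "SELECT"
             || PySem.Str.startswith stripped "WITH"
             || PySem.Str.startswith stripped "CREATE"
             || PySem.Str.startswith stripped "--" then (st.1 ++ [line], true)
      else st) ([], false)
  if res.1 = [] then PySem.Str.strip sql_query
  else PySem.Str.strip (PySem.Str.join "\n" res.1)

-- ===== PORT B =====
-- B-side helper: the (unchanged) markdown-fence stripping phase
def pvStripFences (sql_query : String) : String :=
  let sql_query :=
    if PySem.Str.isIn "```sql" sql_query then ((PySem.Str.split? sql_query "```sql").getD [])[1]!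
    else if PySem.Str.isIn "```" sql_query then ((PySem.Str.split? sql_query "```").getD [])[1]!
    else sql_query
  if PySem.Str.isIn "```" sql_query then ((PySem.Str.split? sql_query "```").getD [])[0]!
  else sql_query

-- B-side helper: does the (already stripped) line look like SQL?
def pvLooksSql (stripped : String) : Bool :=
  PySem.Str.startswith stripped "SELECT" || PySem.Str.startswith stripped "WITH"
    || PySem.Str.startswith stripped "CREATE" || PySem.Str.startswith stripped "--"

def clean_sql_query_py_alt (sql_query : String) : String :=
  let body := pvStripFences sql_query
  let nonblank := ((PySem.Str.split? (PySem.Str.strip body) "\n").getD []).filter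
      (fun line => PySem.Str.strip line != "")
  let res := nonblank.reverse.foldl (fun (st : Nat × Option Nat) line =>
      let count := st.1 + 1
      (count, if pvLooksSql (PySem.Str.strip line) then some count else st.2)) (0, none)
  match res.2 with
  | none => PySem.Str.strip body
  | some best =>
      PySem.Str.strip (PySem.Str.join "\n"
        (PySem.List.slice nonblank (some (-(best : Int))) none))

-- ===== PRECONDITION & SPEC =====
def Spec_clean_sql_query_py (sql_query : String) (out : String) : Prop := out = clean_sql_query_py_alt sql_query
instance (sql_query : String) (out : String) : Decidable (Spec_clean_sql_query_py sql_query out) := by unfold Spec_clean_sql_query_py; infer_instance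

-- ===== CLAIM (what is proved, stated in full; the proofs are below) =====
def Claim_equal_clean_sql_query_py : Prop := ∀ (sql_query : String), Dom_clean_sql_query_py sql_query → Spec_clean_sql_query_py sql_query (clean_sql_query_py sql_query)

-- ===== LEMMAS AND PROOFS =====

-- the two line predicates of the proofs
def pvQ (l : String) : Bool := pvLooksSql (PySem.Str.strip l)
def pvP (l : String) : Bool := PySem.Str.strip l != ""

-- A's fold step, named for the proofs (definitionally A's inline lambda)
def pvStep (st : List String × Bool) (line : String) : List String × Bool :=
  let stripped := PySem.Str.strip line
  if stripped = "" then st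
  else if st.2 || PySem.Str.startswith stripped "SELECT"
         || PySem.Str.startswith stripped "WITH"
         || PySem.Str.startswith stripped "CREATE"
         || PySem.Str.startswith stripped "--" then (st.1 ++ [line], true)
  else st

-- B's fold step, named for the proofs (definitionally B's inline lambda)
def pvRevStep (st : Nat × Option Nat) (line : String) : Nat × Option Nat :=
  let count := st.1 + 1
  (count, if pvLooksSql (PySem.Str.strip line) then some count else st.2)

lemma pvLooksSql_empty : pvLooksSql "" = false := by decide

lemma pvQ_imp_P (l : String) (h : pvQ l = true) : pvP l = true := by
  unfold pvP
  by_cases h0 : PySem.Str.strip l = ""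
  · unfold pvQ at h; rw [h0] at h; simp [pvLooksSql_empty] at h
  · simp [h0]

-- once in_sql is latched, A's fold just appends the non-blank lines
lemma pvFold_true (ls : List String) (acc : List String) :
    ls.foldl pvStep (acc, true) = (acc ++ ls.filter pvP, true) := by
  induction ls generalizing acc with
  | nil => simp
  | cons l ls ih =>
      by_cases h : PySem.Str.strip l = ""
      · simp [pvStep, pvP, h, ih]
      · simp [pvStep, pvP, h, ih, List.append_assoc]

-- before latching, A's fold computes the blank-filtered suffix from the first SQL line
lemma pvFold_false (ls : List String) :
    (ls.foldl pvStep ([], false)).1 =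
      match ls.findIdx? pvQ with
      | none => []
      | some i => (ls.drop i).filter pvP := by
  induction ls with
  | nil => simp
  | cons l ls ih =>
      by_cases hp : pvQ l = true
      · have hne : ¬ PySem.Str.strip l = "" := by
          have := pvQ_imp_P l hp; unfold pvP at this; simpa using this
        have hstep : pvStep ([], false) l = ([l], true) := by
          unfold pvQ pvLooksSql at hp
          simp only [pvStep, if_neg hne, Bool.false_or, hp, if_pos, List.nil_append]
        simp [List.foldl_cons, hstep, pvFold_true, List.findIdx?_cons, hp, pvP, hne]
      · have hstep : pvStep ([], false) l = ([], false) := by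
          unfold pvQ pvLooksSql at hp
          by_cases h : PySem.Str.strip l = ""
          · simp only [pvStep, if_pos h]
          · simp only [pvStep, if_neg h, Bool.false_or, if_neg hp]
        simp only [List.foldl_cons, hstep, ih, List.findIdx?_cons, hp, if_false,
          Bool.false_eq_true]
        cases hfi : ls.findIdx? pvQ with
        | none => simp
        | some i => simp [List.drop_succ_cons]

-- B's reverse counting fold, characterised: count ends as the length, and best maps the
-- first SQL index i to length - i
lemma pvRevFold (ls : List String) :
    ls.reverse.foldl pvRevStep (0, none) =
      (ls.length, (ls.findIdx? pvQ).map (fun i => ls.length - i)) := by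
  induction ls with
  | nil => simp
  | cons l ls ih =>
      rw [List.reverse_cons, List.foldl_append, ih]
      simp only [List.foldl_cons, List.foldl_nil, pvRevStep, List.findIdx?_cons,
        List.length_cons]
      by_cases hp : pvQ l = true
      · have hp' : pvLooksSql (PySem.Str.strip l) = true := hp
        simp [hp, hp']
      · have hp' : pvLooksSql (PySem.Str.strip l) = false := by
          unfold pvQ at hp; simpa using hp
        simp [hp, hp']
        cases ls.findIdx? pvQ with
        | none => simp
        | some i => simp

-- filtering blanks commutes with taking the suffix from the first SQL line
lemma pvFilterDrop (ls : List String) (i : Nat) (h : ls.findIdx? pvQ = some i) :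
    ∃ j, (ls.filter pvP).findIdx? pvQ = some j ∧
      (ls.drop i).filter pvP = (ls.filter pvP).drop j := by
  induction ls generalizing i with
  | nil => simp at h
  | cons l ls ih =>
      by_cases hq : pvQ l = true
      · have hi : i = 0 := by simp [List.findIdx?_cons, hq] at h; omega
        refine ⟨0, ?_, ?_⟩
        · simp [pvQ_imp_P l hq, List.findIdx?_cons, hq]
        · simp [hi]
      · have h' : ∃ k, ls.findIdx? pvQ = some k ∧ i = k + 1 := by
          rw [List.findIdx?_cons, if_neg (by simpa using hq)] at h
          cases hfi : ls.findIdx? pvQ with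
          | none => rw [hfi] at h; simp at h
          | some k => rw [hfi] at h; simp at h; exact ⟨k, rfl, by omega⟩
        obtain ⟨k, hk, hik⟩ := h'
        obtain ⟨j, hj, hdrop⟩ := ih k hk
        by_cases hpl : pvP l = true
        · refine ⟨j + 1, ?_, ?_⟩
          · simp [hpl, List.findIdx?_cons, hq, hj]
          · rw [hik, List.drop_succ_cons, hdrop, List.filter_cons, if_pos hpl,
              List.drop_succ_cons]
        · refine ⟨j, ?_, ?_⟩
          · simp [hpl, hj]
          · rw [hik, List.drop_succ_cons, hdrop, List.filter_cons,
              if_neg (by simpa using hpl)]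

-- no SQL line among ls iff none among the blank-filtered ls
lemma pvFindNone (ls : List String) :
    (ls.filter pvP).findIdx? pvQ = none ↔ ls.findIdx? pvQ = none := by
  simp only [List.findIdx?_eq_none_iff]
  constructor
  · intro h x hx
    by_cases hq : pvQ x = true
    · exact absurd (h x (List.mem_filter.mpr ⟨hx, pvQ_imp_P x hq⟩)) (by simp [hq])
    · simpa using hq
  · intro h x hx; exact h x (List.mem_filter.mp hx).1

-- ===== VERDICT (by name: the statement is the Claim_ definition above) =====
theorem clean_sql_query_py_spec : Claim_equal_clean_sql_query_py := by
  intro s _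
  unfold Spec_clean_sql_query_py clean_sql_query_py clean_sql_query_py_alt pvStripFences
  simp only []
  generalize (if PySem.Str.isIn "```sql" s then ((PySem.Str.split? s "```sql").getD [])[1]!
    else if PySem.Str.isIn "```" s then ((PySem.Str.split? s "```").getD [])[1]! else s) = t1
  generalize (if PySem.Str.isIn "```" t1 then ((PySem.Str.split? t1 "```").getD [])[0]! else t1) = t2
  generalize hl : (PySem.Str.split? (PySem.Str.strip t2) "\n").getD [] = lines
  show (if (List.foldl pvStep ([], false) lines).1 = [] then PySem.Str.strip t2
        else PySem.Str.strip (PySem.Str.join "\n" (List.foldl pvStep ([], false) lines).1)) =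
       (match ((lines.filter pvP).reverse.foldl pvRevStep (0, none)).2 with
        | none => PySem.Str.strip t2
        | some best => PySem.Str.strip (PySem.Str.join "\n"
            (PySem.List.slice (lines.filter pvP) (some (-(best : Int))) none)))
  rw [pvFold_false, pvRevFold]
  cases hfi : lines.findIdx? pvQ with
  | none =>
      rw [(pvFindNone lines).mpr hfi]
      simp
  | some i =>
      obtain ⟨j, hj, hdrop⟩ := pvFilterDrop lines i hfi
      rw [hj]
      have hjlt : j < (lines.filter pvP).length :=
        (List.findIdx?_eq_some_iff_findIdx_eq.mp hj).1
      have hbest : 0 < (lines.filter pvP).length - j := by omega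
      simp only [Option.map_some]
      rw [PySem.List.slice_from_neg_natCast _ _ hbest]
      have harith : (lines.filter pvP).length - ((lines.filter pvP).length - j) = j := by omega
      rw [harith, ← hdrop]
      have hne2 : (lines.drop i).filter pvP ≠ [] := by
        have hi : i < lines.length := (List.findIdx?_eq_some_iff_findIdx_eq.mp hfi).1
        have hq : pvQ (lines[i]'hi) = true := (List.findIdx?_eq_some_iff_getElem.mp hfi).2.1
        intro hnil
        have hmem : (lines[i]'hi) ∈ (lines.drop i).filter pvP := by
          refine List.mem_filter.mpr ⟨?_, pvQ_imp_P _ hq⟩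
          have h0 : (lines.drop i)[0]? = some (lines[i]'hi) := by simp [List.getElem?_drop]
          exact List.mem_of_getElem? h0
        rw [hnil] at hmem
        exact absurd hmem (List.not_mem_nil)
      rw [if_neg hne2]
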